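-- pv_equiv track=rewrite | github.com/Evan-Swanson/P.A.D-Board-Solver | board.py | findIndexOfPosition
-- ===== SOURCE A (Python) =====
-- def findIndexOfPosition(moveList, position):
--     currentPosition = [0,0]
--     index = 0
--     for move in moveList:
--         if currentPosition == position:
--             return index
--         else:
--             if move == 'left':
--                 currentPosition[1] -= 1
--                 index += 1
--             elif move == 'right':
--                 currentPosition[1] += 1
--                 index += 1
--             elif move == 'up':
--                 currentPosition[0] -=1
--                 index += 1
--             elif move == 'down':
--                 currentPosition[0] += 1
--                 index += 1
--     return -1
-- ===== SOURCE B (Python) =====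
-- def findIndexOfPosition(moveList, position):
--     deltas = {'left': (0, -1), 'right': (0, 1), 'up': (-1, 0), 'down': (1, 0)}
--     r, c = 0, 0
--     trajectory = []
--     for move in moveList:
--         trajectory.append([r, c])
--         dr, dc = deltas.get(move, (0, 0))
--         r, c = r + dr, c + dc
--     for i, pos in enumerate(trajectory):
--         if pos == position:
--             return i
--     return -1
-- ===== Notes on version B (the rewrite author's own statement) =====
-- stated objective: alternative
-- what changed: A fuses check-then-move in one early-returning pass with a counter that skips unrecognized moves; B first builds the trajectory of positions via a delta dict, then separately scans it with enumerate for the first match.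
-- intended difference: On move lists whose first position match is preceded by at least one unrecognized move, A returns only the count of recognized moves before the match (its index skips unrecognized entries), while B returns the actual list index of the matching step, which is what 'find index of position' means. — e.g. on findIndexOfPosition(["x", "right", "y"], [0, 1]): A returns 1, B returns 2
import Mathlib
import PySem

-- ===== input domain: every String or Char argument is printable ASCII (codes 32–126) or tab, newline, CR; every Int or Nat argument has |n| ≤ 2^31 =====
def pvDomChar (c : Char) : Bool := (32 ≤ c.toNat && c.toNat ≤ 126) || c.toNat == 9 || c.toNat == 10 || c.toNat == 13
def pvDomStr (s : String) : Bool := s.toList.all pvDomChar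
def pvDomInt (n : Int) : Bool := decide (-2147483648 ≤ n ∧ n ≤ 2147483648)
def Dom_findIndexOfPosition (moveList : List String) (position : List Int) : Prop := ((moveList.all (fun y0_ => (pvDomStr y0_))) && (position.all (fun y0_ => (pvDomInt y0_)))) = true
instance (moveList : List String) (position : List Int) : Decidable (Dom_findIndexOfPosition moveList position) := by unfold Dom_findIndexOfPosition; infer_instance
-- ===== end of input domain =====

-- B builds the trajectory of positions, then scans it for the first match (alternative decomposition);
-- where the first match is preceded by unrecognized moves, B returns the true list index while A returns
-- only the recognized-move count — stated below as the intended difference D_.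

-- ===== PORT A =====
-- loop over moveList with state (row, col, index); check before moving; index increments only on the four moves
def findIndexOfPositionGo : List String → Int → Int → Int → List Int → Int
  | [], _, _, _, _ => -1
  | move :: rest, r, c, idx, position =>
    if [r, c] = position then idx
    else if move = "left" then findIndexOfPositionGo rest r (c - 1) (idx + 1) position
    else if move = "right" then findIndexOfPositionGo rest r (c + 1) (idx + 1) position
    else if move = "up" then findIndexOfPositionGo rest (r - 1) c (idx + 1) position
    else if move = "down" then findIndexOfPositionGo rest (r + 1) c (idx + 1) position
    else findIndexOfPositionGo rest r c idx position

def findIndexOfPosition (moveList : List String) (position : List Int) : Int :=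
  findIndexOfPositionGo moveList 0 0 0 position

-- ===== PORT B =====
-- deltas.get(move, (0, 0)) from Source B
def pvDelta (move : String) : Int × Int :=
  if move = "left" then (0, -1)
  else if move = "right" then (0, 1)
  else if move = "up" then (-1, 0)
  else if move = "down" then (1, 0)
  else (0, 0)

-- pass 1 of Source B: trajectory.append([r, c]) before each move is applied
def pvTrajectory : List String → Int → Int → List (List Int)
  | [], _, _ => []
  | m :: rest, r, c => [r, c] :: pvTrajectory rest (r + (pvDelta m).1) (c + (pvDelta m).2)

-- pass 2 of Source B: for i, pos in enumerate(trajectory): if pos == position: return i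
def pvScanTraj : List (List Int) → Int → List Int → Int
  | [], _, _ => -1
  | p :: rest, i, position => if p = position then i else pvScanTraj rest (i + 1) position

def findIndexOfPosition_alt (moveList : List String) (position : List Int) : Int :=
  pvScanTraj (pvTrajectory moveList 0 0) 0 position

-- ===== PRECONDITION & SPEC =====
-- position of the cursor after the recognized moves of ms (row, col) as a two-element list
def pvPos (ms : List String) : List Int :=
  [((ms.count "down" : Int)) - ms.count "up", ((ms.count "right" : Int)) - ms.count "left"]

-- On move lists whose first position match is preceded by at least one unrecognized move, A returns only the
-- count of recognized moves before the match (its index skips unrecognized entries), while B returns the actual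
-- list index of the matching step, which is what 'find index of position' means.
def D_findIndexOfPosition (moveList : List String) (position : List Int) : Prop :=
  ∃ j, j < moveList.length ∧ pvPos (moveList.take j) = position ∧
    ¬ moveList.take j ⊆ ["left", "right", "up", "down"] ∧
    ∀ i, i < j → pvPos (moveList.take i) ≠ position

instance (moveList : List String) (position : List Int) : Decidable (D_findIndexOfPosition moveList position) := by
  unfold D_findIndexOfPosition; infer_instance

def Spec_findIndexOfPosition (moveList : List String) (position : List Int) (out : Int) : Prop :=
  ¬ D_findIndexOfPosition moveList position → out = findIndexOfPosition_alt moveList position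
instance (moveList : List String) (position : List Int) (out : Int) : Decidable (Spec_findIndexOfPosition moveList position out) := by unfold Spec_findIndexOfPosition; infer_instance

def pvDiffWitness_findIndexOfPosition : List String × List Int := (["x", "right", "y"], [0, 1])
def pvDiffWitnessOut_findIndexOfPosition : Int × Int := (1, 2)

-- ===== CLAIM (what is proved, stated in full; the proofs are below) =====
def Claim_unchanged_findIndexOfPosition : Prop := ∀ (moveList : List String) (position : List Int), Dom_findIndexOfPosition moveList position → Spec_findIndexOfPosition moveList position (findIndexOfPosition moveList position)
def Claim_changed_findIndexOfPosition : Prop := Dom_findIndexOfPosition (pvDiffWitness_findIndexOfPosition.1) (pvDiffWitness_findIndexOfPosition.2) ∧ D_findIndexOfPosition (pvDiffWitness_findIndexOfPosition.1) (pvDiffWitness_findIndexOfPosition.2) ∧ findIndexOfPosition (pvDiffWitness_findIndexOfPosition.1) (pvDiffWitness_findIndexOfPosition.2) = pvDiffWitnessOut_findIndexOfPosition.1 ∧ findIndexOfPosition_alt (pvDiffWitness_findIndexOfPosition.1) (pvDiffWitness_findIndexOfPosition.2) = pvDiffWitnessOut_findIndexOfPosition.2 ∧ pvDiffWitnessOut_findIndexOfPosition.1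 ≠ pvDiffWitnessOut_findIndexOfPosition.2
def Claim_exact_findIndexOfPosition : Prop := ∀ (moveList : List String) (position : List Int), Dom_findIndexOfPosition moveList position → D_findIndexOfPosition moveList position → findIndexOfPosition moveList position ≠ findIndexOfPosition_alt moveList position

-- ===== LEMMAS AND PROOFS =====

-- one step of the cursor (proof-side model of both loops)
def pvStepD (p : Int × Int) (m : String) : Int × Int :=
  if m = "left" then (p.1, p.2 - 1)
  else if m = "right" then (p.1, p.2 + 1)
  else if m = "up" then (p.1 - 1, p.2)
  else if m = "down" then (p.1 + 1, p.2)
  else p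

def pvIsMove (m : String) : Bool :=
  m = "left" || m = "right" || m = "up" || m = "down"

def pvUnrec (ms : List String) : Nat := (ms.filter (fun m => !pvIsMove m)).length

def pvRec (ms : List String) : Nat := (ms.filter pvIsMove).length

-- first index j (position before step j matches), generalized over the start state
def pvFirstJ : List String → Int × Int → List Int → Option Nat
  | [], _, _ => none
  | m :: rest, p, position =>
    if [p.1, p.2] = position then some 0
    else (pvFirstJ rest (pvStepD p m) position).map (· + 1)

def pvHitFrom (p : Int × Int) (ms : List String) (position : List Int) (j : Nat) : Prop :=
  [((ms.take j).foldl pvStepD p).1, ((ms.take j).foldl pvStepD p).2] = position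

theorem pvStepD_delta (p : Int × Int) (m : String) :
    pvStepD p m = (p.1 + (pvDelta m).1, p.2 + (pvDelta m).2) := by
  unfold pvStepD pvDelta
  split_ifs <;> simp [Prod.ext_iff] <;> omega

-- characterization of port B
theorem scan_char (ms : List String) (p : Int × Int) (i : Int) (position : List Int) :
    pvScanTraj (pvTrajectory ms p.1 p.2) i position =
      (match pvFirstJ ms p position with
       | some j => i + (j : Int)
       | none => -1) := by
  induction ms generalizing p i with
  | nil => simp [pvTrajectory, pvScanTraj, pvFirstJ]
  | cons m rest ih =>
    by_cases h : ([p.1, p.2] : List Int) = position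
    · simp [pvTrajectory, pvScanTraj, pvFirstJ, h]
    · simp only [pvTrajectory, pvScanTraj, pvFirstJ, if_neg h]
      rw [show p.1 + (pvDelta m).1 = (pvStepD p m).1 by rw [pvStepD_delta],
        show p.2 + (pvDelta m).2 = (pvStepD p m).2 by rw [pvStepD_delta],
        ih (pvStepD p m) (i + 1)]
      cases hf : pvFirstJ rest (pvStepD p m) position <;>
        simp only [hf, Option.map_none, Option.map_some] <;> push_cast <;> ring_nf

-- one step of port A's loop in terms of pvStepD / pvIsMove
theorem go_step (m : String) (rest : List String) (p : Int × Int) (idx : Int) (position : List Int)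
    (h : ¬ ([p.1, p.2] : List Int) = position) :
    findIndexOfPositionGo (m :: rest) p.1 p.2 idx position =
      findIndexOfPositionGo rest (pvStepD p m).1 (pvStepD p m).2
        (idx + (if pvIsMove m then 1 else 0)) position := by
  by_cases h1 : m = "left"
  · subst h1; simp [findIndexOfPositionGo, pvStepD, pvIsMove, h]
  · by_cases h2 : m = "right"
    · subst h2; simp [findIndexOfPositionGo, pvStepD, pvIsMove, h]
    · by_cases h3 : m = "up"
      · subst h3; simp [findIndexOfPositionGo, pvStepD, pvIsMove, h]
      · by_cases h4 : m = "down"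
        · subst h4; simp [findIndexOfPositionGo, pvStepD, pvIsMove, h]
        · simp [findIndexOfPositionGo, pvStepD, pvIsMove, h, h1, h2, h3, h4]

-- characterization of port A
theorem go_char (ms : List String) (p : Int × Int) (idx : Int) (position : List Int) :
    findIndexOfPositionGo ms p.1 p.2 idx position =
      (match pvFirstJ ms p position with
       | some j => idx + ((pvRec (ms.take j)) : Int)
       | none => -1) := by
  induction ms generalizing p idx with
  | nil => simp [findIndexOfPositionGo, pvFirstJ]
  | cons m rest ih =>
    by_cases h : ([p.1, p.2] : List Int) = position
    · simp [findIndexOfPositionGo, pvFirstJ, h, pvRec]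
    · have hrec : ∀ j : Nat, (pvRec ((m :: rest).take (j + 1)) : Int) =
          (if pvIsMove m then (1 : Int) else 0) + (pvRec (rest.take j) : Int) := by
        intro j
        simp only [List.take_succ_cons, pvRec, List.filter]
        by_cases hm : pvIsMove m <;> simp [hm] <;> push_cast <;> ring
      rw [go_step m rest p idx position h, ih (pvStepD p m)]
      simp only [pvFirstJ, if_neg h]
      cases hf : pvFirstJ rest (pvStepD p m) position <;>
        simp only [Option.map_none, Option.map_some]
      all_goals first
        | rfl
        | (rename_i j
           rw [hrec j]
           by_cases hm : pvIsMove m <;> simp [hm] <;> ring)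

-- the fold of pvStepD is the count-based position of pvPos
theorem walk_counts (ms : List String) (p : Int × Int) :
    ms.foldl pvStepD p =
      (p.1 + (((ms.count "down" : Int)) - ms.count "up"),
       p.2 + (((ms.count "right" : Int)) - ms.count "left")) := by
  induction ms generalizing p with
  | nil => simp
  | cons m rest ih =>
    rw [List.foldl_cons, ih (pvStepD p m)]
    by_cases h1 : m = "left"
    · subst h1; simp [pvStepD, List.count_cons, Prod.ext_iff] <;> omega
    · by_cases h2 : m = "right"
      · subst h2; simp [pvStepD, List.count_cons, Prod.ext_iff] <;> omega
      · by_cases h3 : m = "up"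
        · subst h3; simp [pvStepD, List.count_cons, Prod.ext_iff] <;> omega
        · by_cases h4 : m = "down"
          · subst h4; simp [pvStepD, List.count_cons, Prod.ext_iff] <;> omega
          · simp [pvStepD, List.count_cons, Prod.ext_iff, h1, h2, h3, h4,
              (by simp [h1] : (m == "left") = false), (by simp [h2] : (m == "right") = false),
              (by simp [h3] : (m == "up") = false), (by simp [h4] : (m == "down") = false)]

theorem pvPos_eq (t : List String) :
    pvPos t = [(t.foldl pvStepD (0, 0)).1, (t.foldl pvStepD (0, 0)).2] := by
  rw [walk_counts]; simp [pvPos]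

theorem hit_iff (ms : List String) (position : List Int) (j : Nat) :
    pvPos (ms.take j) = position ↔ pvHitFrom (0, 0) ms position j := by
  unfold pvHitFrom; rw [pvPos_eq]

theorem stray_unrec (t : List String) :
    ¬ t ⊆ ["left", "right", "up", "down"] ↔ 0 < pvUnrec t := by
  unfold pvUnrec
  rw [List.length_pos_iff, Ne, List.filter_eq_nil_iff, List.subset_def]
  simp [pvIsMove]

theorem firstJ_none (ms : List String) (p : Int × Int) (position : List Int)
    (h : pvFirstJ ms p position = none) :
    ∀ j, j < ms.length → ¬ pvHitFrom p ms position j := by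
  induction ms generalizing p with
  | nil => intro j hj; simp at hj
  | cons m rest ih =>
    intro j hj
    by_cases hm : ([p.1, p.2] : List Int) = position
    · simp [pvFirstJ, hm] at h
    · simp only [pvFirstJ, if_neg hm, Option.map_eq_none_iff] at h
      cases j with
      | zero => simpa [pvHitFrom] using hm
      | succ j' =>
        have := ih (pvStepD p m) h j' (by simpa using hj)
        simpa [pvHitFrom, List.take_succ_cons] using this

theorem firstJ_some (ms : List String) (p : Int × Int) (position : List Int) (j : Nat)
    (h : pvFirstJ ms p position = some j) :
    j < ms.length ∧ pvHitFrom p ms position j ∧ ∀ i, i < j → ¬ pvHitFrom p ms position i := by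
  induction ms generalizing p j with
  | nil => simp [pvFirstJ] at h
  | cons m rest ih =>
    by_cases hm : ([p.1, p.2] : List Int) = position
    · simp only [pvFirstJ, if_pos hm, Option.some.injEq] at h
      subst h
      refine ⟨by simp, by simpa [pvHitFrom] using hm, by intro i hi; omega⟩
    · simp only [pvFirstJ, if_neg hm, Option.map_eq_some_iff] at h
      obtain ⟨j', hj', rfl⟩ := h
      obtain ⟨hlen, hhit, hmin⟩ := ih (pvStepD p m) j' hj'
      refine ⟨by simpa using hlen, by simpa [pvHitFrom, List.take_succ_cons] using hhit, ?_⟩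
      intro i hi
      cases i with
      | zero => simpa [pvHitFrom] using hm
      | succ i' =>
        have := hmin i' (by omega)
        simpa [pvHitFrom, List.take_succ_cons] using this

theorem firstJ_of_first (ms : List String) (position : List Int) (j : Nat)
    (hlen : j < ms.length) (hhit : pvHitFrom (0, 0) ms position j)
    (hmin : ∀ i, i < j → ¬ pvHitFrom (0, 0) ms position i) :
    pvFirstJ ms (0, 0) position = some j := by
  cases hf : pvFirstJ ms (0, 0) position with
  | none => exact absurd hhit (firstJ_none ms (0, 0) position hf j hlen)
  | some j' =>
    obtain ⟨_, hhit', hmin'⟩ := firstJ_some ms (0, 0) position j' hf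
    rcases lt_trichotomy j j' with h | h | h
    · exact absurd hhit (hmin' j h)
    · rw [h]
    · exact absurd hhit' (hmin j' h)

theorem rec_add_unrec (ms : List String) : pvRec ms + pvUnrec ms = ms.length := by
  induction ms with
  | nil => simp [pvRec, pvUnrec]
  | cons m rest ih =>
    simp only [pvRec, pvUnrec, List.filter, List.length_cons] at *
    by_cases hm : pvIsMove m <;> simp [hm] <;> omega

-- ===== VERDICT (by name: the statements are the Claim_ definitions above) =====
theorem findIndexOfPosition_spec : Claim_unchanged_findIndexOfPosition := by
  intro moveList position _ hnd
  unfold findIndexOfPosition findIndexOfPosition_alt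
  rw [show (0 : Int) = ((0, 0) : Int × Int).1 from rfl, show (0 : Int) = ((0, 0) : Int × Int).2 from rfl,
    go_char moveList (0, 0) 0 position, scan_char moveList (0, 0) 0 position]
  cases hf : pvFirstJ moveList (0, 0) position with
  | none => rfl
  | some j =>
    obtain ⟨hlen, hhit, hmin⟩ := firstJ_some moveList (0, 0) position j hf
    have hu : pvUnrec (moveList.take j) = 0 := by
      by_contra hu
      exact hnd ⟨j, hlen, (hit_iff moveList position j).mpr hhit,
        (stray_unrec (moveList.take j)).mpr (by omega),
        fun i hi hh => hmin i hi ((hit_iff moveList position i).mp hh)⟩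
    have hl : (moveList.take j).length = j := by simp [List.length_take]; omega
    have := rec_add_unrec (moveList.take j)
    have hrj : pvRec (moveList.take j) = j := by omega
    simp [hrj]

theorem findIndexOfPosition_changed : Claim_changed_findIndexOfPosition := by
  unfold Claim_changed_findIndexOfPosition; decide

theorem findIndexOfPosition_tight : Claim_exact_findIndexOfPosition := by
  intro moveList position _ hD
  obtain ⟨j, hlen, hhit, hstray, hmin⟩ := hD
  have hf := firstJ_of_first moveList position j hlen ((hit_iff moveList position j).mp hhit)
    (fun i hi hh => hmin i hi ((hit_iff moveList position i).mpr hh))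
  unfold findIndexOfPosition findIndexOfPosition_alt
  rw [show (0 : Int) = ((0, 0) : Int × Int).1 from rfl, show (0 : Int) = ((0, 0) : Int × Int).2 from rfl,
    go_char moveList (0, 0) 0 position, scan_char moveList (0, 0) 0 position, hf]
  have hu : 0 < pvUnrec (moveList.take j) := (stray_unrec (moveList.take j)).mp hstray
  have hl : (moveList.take j).length = j := by simp [List.length_take]; omega
  have := rec_add_unrec (moveList.take j)
  have hlt : pvRec (moveList.take j) < j := by omega
  simp only [zero_add]
  exact_mod_cast Nat.ne_of_lt hlt
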